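-- pv_equiv track=rewrite | github.com/L3m1K0uad10/Plugin | backend-script/utils/line_split.py | line_split
-- ===== SOURCE A (Python) =====
-- def line_split(text):
--     index1 = 0
--     index2 = 0
--
--     line_split_data = []
--
--     for i in range(0, len(text)):
--         if text[i] == "\n" and i == 0:
--             pass
--         elif text[i] == "\n" and i != 0:
--             index2 = i + 1
--             line_data = text[index1:index2]
--             if len(line_data) > 1:
--                 line_data = line_data.replace("\n", "")
--             line_split_data.append(line_data)
--             index1 = i
--
--     return line_split_data
--
--     """
--     text.strip().split("\n") could have worked
--     """
-- ===== SOURCE B (Python) =====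
-- def line_split(text):
--     parts = text.split("\n")
--     if text.startswith("\n"):
--         return parts[1:-1]
--     return parts[:-1]
-- ===== Notes on version B (the rewrite author's own statement) =====
-- stated objective: faster
-- what changed: A's char-by-char loop tracking index1/index2 with a fresh slice+replace pass per newline is replaced by a single split on the newline separator plus a boundary slice (drop the last part, and also the first part when the text starts with a newline).
import Mathlib
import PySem

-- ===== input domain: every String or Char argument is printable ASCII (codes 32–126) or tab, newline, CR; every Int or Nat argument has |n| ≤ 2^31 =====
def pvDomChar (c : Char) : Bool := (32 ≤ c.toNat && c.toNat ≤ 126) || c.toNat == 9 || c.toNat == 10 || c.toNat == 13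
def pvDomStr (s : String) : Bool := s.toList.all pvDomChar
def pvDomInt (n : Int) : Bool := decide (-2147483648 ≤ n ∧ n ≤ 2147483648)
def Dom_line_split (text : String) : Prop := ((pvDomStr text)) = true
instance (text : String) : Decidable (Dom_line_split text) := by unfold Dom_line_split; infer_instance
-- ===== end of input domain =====

-- B replaces A's char-by-char index loop (a slice+replace pass per newline) by one split on the newline separator and a boundary slice; measured faster.

-- ===== PORT A =====
-- loop body of A's `for i in range(0, len(text))`: state = (index1, line_split_data)
def stepA (text : String) (st : Int × List String) (i : Int) : Int × List String :=
  if PySem.Str.pyGet? text i = some '\n' ∧ i = 0 then st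
  else if PySem.Str.pyGet? text i = some '\n' ∧ i ≠ 0 then
    let index2 := i + 1
    let line_data := PySem.Str.slice text (some st.1) (some index2)
    let line_data := if PySem.Str.len line_data > 1 then PySem.Str.replace line_data "\n" "" else line_data
    (i, st.2 ++ [line_data])
  else st

def line_split (text : String) : List String :=
  (((PySem.List.pyRange 0 (PySem.Str.len text) 1).foldl (stepA text) (0, []))).2

-- ===== PORT B =====
-- text.split("\n"): the separator "\n" is non-empty, so Python's split never raises; split? is `some` here and getD's default is unreachable
def line_split_alt (text : String) : List String :=
  let parts := (PySem.Str.split? text "\n").getD []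
  if PySem.Str.startswith text "\n" then PySem.List.slice parts (some 1) (some (-1))
  else PySem.List.slice parts none (some (-1))

-- ===== PRECONDITION & SPEC =====
def Spec_line_split (text : String) (out : List String) : Prop := out = line_split_alt text
instance (text : String) (out : List String) : Decidable (Spec_line_split text out) := by unfold Spec_line_split; infer_instance

-- ===== CLAIM (what is proved, stated in full; the proofs are below) =====
def Claim_equal_line_split : Prop := ∀ (text : String), Dom_line_split text → Spec_line_split text (line_split text)

-- ===== LEMMAS AND PROOFS =====

-- Python split on "\n", written as the plain structural recursion the proofs induct over
def splitRec (cur : List Char) : List Char → List (List Char)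
  | [] => [cur.reverse]
  | c :: t => if c = '\n' then cur.reverse :: splitRec [] t else splitRec (c :: cur) t

-- the pieces A's loop emits while scanning t with pending (reversed, newline-free) chars cur
def piecesA (cur : List Char) : List Char → List String
  | [] => []
  | c :: t => if c = '\n' then String.ofList cur.reverse :: piecesA [] t else piecesA (c :: cur) t

theorem replace_go_newline (l : List Char) : ∀ (fuel : Nat) (acc : List Char), l.length ≤ fuel →
    PySem.Chars.replace.go ['\n'] [] fuel l acc = acc.reverse ++ l.filter (· ≠ '\n') := by
  induction l with
  | nil => intro fuel acc _; cases fuel <;> simp [PySem.Chars.replace.go]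
  | cons c t ih =>
    intro fuel acc hf
    cases fuel with
    | zero => simp at hf
    | succ m =>
      simp only [PySem.Chars.replace.go, List.isPrefixOf, List.filter]
      by_cases hc : c = '\n'
      · simp only [hc]; simp [ih m acc (by simpa using hf)]
      · have hc' : ¬ ('\n' = c) := fun h => hc h.symm
        simp [beq_iff_eq, hc', hc, ih m (c :: acc) (by simpa using hf)]

theorem replace_newline (l : List Char) :
    PySem.Chars.replace l ['\n'] [] = l.filter (· ≠ '\n') := by
  simp [PySem.Chars.replace, replace_go_newline l l.length [] le_rfl]

theorem splitOn_go_newline (l : List Char) : ∀ (fuel : Nat) (cur : List Char) (acc : List (List Char)),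
    l.length < fuel →
    PySem.Chars.splitOn.go ['\n'] fuel l cur acc = acc.reverse ++ splitRec cur l := by
  induction l with
  | nil =>
    intro fuel cur acc hf
    cases fuel with
    | zero => simp at hf
    | succ m => simp [PySem.Chars.splitOn.go, splitRec]
  | cons c t ih =>
    intro fuel cur acc hf
    cases fuel with
    | zero => simp at hf
    | succ m =>
      simp only [PySem.Chars.splitOn.go, List.isPrefixOf, splitRec]
      by_cases hc : c = '\n'
      · simp [hc, ih m [] (cur.reverse :: acc) (by simpa using hf)]
      · simp [beq_iff_eq, Ne.symm hc, hc, ih m (c :: cur) acc (by simpa using hf)]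

theorem splitOn_newline (l : List Char) :
    PySem.Chars.splitOn l ['\n'] = splitRec [] l := by
  simpa [PySem.Chars.splitOn] using splitOn_go_newline l (l.length + 1) [] [] (by omega)

theorem splitRec_ne_nil (cur : List Char) (l : List Char) : splitRec cur l ≠ [] := by
  induction l generalizing cur with
  | nil => simp [splitRec]
  | cons c t ih => by_cases hc : c = '\n' <;> simp [splitRec, hc, ih]

theorem piecesA_eq_dropLast (l : List Char) : ∀ (cur : List Char),
    piecesA cur l = (List.map String.ofList (splitRec cur l)).dropLast := by
  induction l with
  | nil => intro cur; simp [piecesA, splitRec]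
  | cons c t ih =>
    intro cur
    by_cases hc : c = '\n'
    · subst hc
      have hne : List.map String.ofList (splitRec [] t) ≠ [] := by
        simp [splitRec_ne_nil]
      simp [piecesA, splitRec, List.dropLast_cons_of_ne_nil hne, ih]
    · simp [piecesA, splitRec, hc, ih]

theorem slice_one_neg_one {α : Type} (xs : List α) :
    PySem.List.slice xs (some 1) (some (-1)) = xs.tail.dropLast := by
  cases xs with
  | nil => rfl
  | cons x t =>
    simp only [PySem.List.slice, PySem.List.clampIdx]
    norm_num
    rw [List.dropLast_eq_take]
    cases t with
    | nil => simp
    | cons y u => simp [Nat.min_def]; split_ifs <;> omega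

-- the loop invariant: scanning from index j with index1 = p, pending chars = the
-- newline-free part of text[p:j] (reversed)
theorem loopA (text : String) (t : List Char) : ∀ (j p : Nat) (acc : List String),
    text.toList.drop j = t → (p < j ∨ (j = 0 ∧ p = 0)) →
    (j = 0 → text.toList[0]? ≠ some '\n') →
    ((List.map (fun (k : Nat) => (k : Int)) (List.range' j t.length)).foldl (stepA text) ((p : Int), acc)).2
      = acc ++ piecesA ((((text.toList.drop p).take (j - p)).filter (· ≠ '\n')).reverse) t := by
  induction t with
  | nil => intro j p acc _ _ _; simp [piecesA]
  | cons c t' ih =>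
    intro j p acc hdrop hpj h0
    have hj : text.toList[j]? = some c := by
      have := congrArg List.head? hdrop
      simpa [List.head?_drop] using this
    obtain ⟨hjlen, -⟩ := List.getElem?_eq_some_iff.mp hj
    have hdrop' : text.toList.drop (j + 1) = t' := by
      have := congrArg List.tail hdrop
      simpa [List.tail_drop] using this
    have hget : PySem.Str.pyGet? text (j : Int) = some c := by
      rw [PySem.Str.pyGet?_natCast]; exact hj
    simp only [List.length_cons]
    rw [List.range'_succ, List.map_cons, List.foldl_cons]
    by_cases hc : c = '\n'
    · by_cases hj0 : j = 0
      · exact absurd hj (by simpa [hj0, hc] using h0 hj0)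
      · -- emission step
        have hpltj : p < j := by rcases hpj with h | h; exact h; omega
        have hstep : stepA text ((p : Int), acc) (j : Int) =
            ((j : Int), acc ++ [PySem.Str.replace
              (PySem.Str.slice text (some (p : Int)) (some ((j : Int) + 1))) "\n" ""]) := by
          have hlen : PySem.Str.len (PySem.Str.slice text (some (p : Int)) (some ((j : Int) + 1))) > 1 := by
            rw [PySem.Str.len_eq, PySem.Str.toList_slice, PySem.Chars.slice_eq_listSlice]
            have : ((j : Int) + 1) = ((j + 1 : Nat) : Int) := by omega
            rw [this, PySem.List.slice_natCast]
            simp only [List.length_take, List.length_drop]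
            have : min (j + 1 - p) (text.toList.length - p) = j + 1 - p := by omega
            rw [this]; push_cast; omega
          have hlen2 : (PySem.List.slice text.toList (some (p : Int)) (some ((j : Int) + 1))).length > 1 := by
            rw [PySem.Str.len_eq, PySem.Str.toList_slice, PySem.Chars.slice_eq_listSlice] at hlen
            omega
          simp only [stepA, hget, hj0]
          norm_num [hc, Int.natCast_eq_zero, hj0]
          intro hcon
          omega
        rw [hstep]
        have hslice : (PySem.Str.replace
            (PySem.Str.slice text (some (p : Int)) (some ((j : Int) + 1))) "\n" "")
            = String.ofList ((((text.toList.drop p).take (j - p)).filter (· ≠ '\n'))) := by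
          apply String.toList_injective
          rw [PySem.Str.toList_replace, PySem.Str.toList_slice, PySem.Chars.slice_eq_listSlice]
          have hcast : ((j : Int) + 1) = ((j + 1 : Nat) : Int) := by omega
          rw [hcast, PySem.List.slice_natCast]
          have htake : (text.toList.drop p).take (j + 1 - p)
              = (text.toList.drop p).take (j - p) ++ ['\n'] := by
            have h1 : j + 1 - p = (j - p) + 1 := by omega
            rw [h1, List.take_add_one]
            have : (text.toList.drop p)[j - p]? = some '\n' := by
              rw [List.getElem?_drop]
              have : p + (j - p) = j := by omega
              rw [this, hj, hc]
            simp [this]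
          simp only [String.toList_ofList]
          rw [htake]
          have h1 : ("\n" : String).toList = ['\n'] := rfl
          have h2 : ("" : String).toList = ([] : List Char) := rfl
          rw [h1, h2, replace_newline, List.filter_append]
          simp
        rw [hslice]
        rw [ih (j + 1) j (acc ++ [_]) hdrop' (by omega) (by omega)]
        have hcur1 : (text.toList.drop j).take (j + 1 - j) = [c] := by
          have h1 : j + 1 - j = 1 := by omega
          rw [h1, hdrop]; rfl
        rw [hcur1]
        simp [piecesA, hc, List.append_assoc]
    · -- ordinary char: state unchanged
      have hcond : ¬ (PySem.Str.pyGet? text (j : Int) = some '\n') := by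
        rw [hget]; simp [hc]
      have hcondL : ¬ (text.toList[j]? = some '\n') := by
        rw [hj]; simp [hc]
      have hstep : stepA text ((p : Int), acc) (j : Int) = ((p : Int), acc) := by
        simp [stepA, hcond, hcondL]
      rw [hstep]
      have hple : p ≤ j := by rcases hpj with h | h <;> omega
      rw [ih (j + 1) p acc hdrop' (by omega) (by omega)]
      have hcur : (text.toList.drop p).take (j + 1 - p)
          = (text.toList.drop p).take (j - p) ++ [c] := by
        have h1 : j + 1 - p = (j - p) + 1 := by omega
        rw [h1, List.take_add_one]
        have : (text.toList.drop p)[j - p]? = some c := by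
          rw [List.getElem?_drop]
          have : p + (j - p) = j := by omega
          rw [this, hj]
        simp [this]
      rw [hcur, List.filter_append]
      simp [piecesA, hc]

theorem line_split_eq_piecesA (text : String) :
    line_split text = piecesA []
      (if text.toList.head? = some '\n' then text.toList.tail else text.toList) := by
  unfold line_split
  rw [PySem.Str.len_eq, PySem.List.pyRange_zero_natCast, List.range_eq_range']
  by_cases hh : text.toList.head? = some '\n'
  · rw [if_pos hh]
    cases hts : text.toList with
    | nil => simp [hts] at hh
    | cons c rest =>
      have hc : c = '\n' := by simp [hts] at hh; exact hh
      simp only [hts, List.length_cons, List.tail_cons]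
      simp only [List.range'_succ, List.map_cons, List.foldl_cons]
      have hget : PySem.Str.pyGet? text ((0 : Nat) : Int) = some '\n' := by
        rw [PySem.Str.pyGet?_natCast, hts, hc]; rfl
      have hstep : stepA text ((0 : Int), ([] : List String)) ((0 : Nat) : Int)
          = ((0 : Int), ([] : List String)) := by
        simp [stepA]
      have h00 : ((0 : Nat) : Int) = (0 : Int) := by norm_num
      rw [h00] at hstep ⊢
      rw [hstep]
      have h01 : (0 : Int) = ((0 : Nat) : Int) := by norm_num
      rw [h01]
      have := loopA text rest 1 0 [] (by rw [hts]; rfl) (by omega) (by omega)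
      simpa [hts, hc] using this
  · rw [if_neg hh]
    have h01 : (0 : Int) = ((0 : Nat) : Int) := by norm_num
    rw [h01]
    have := loopA text text.toList 0 0 [] (by simp) (by omega)
      (by intro _; simpa [List.head?_eq_getElem?] using hh)
    simpa using this

theorem alt_eq_piecesA (text : String) :
    line_split_alt text = piecesA []
      (if text.toList.head? = some '\n' then text.toList.tail else text.toList) := by
  unfold line_split_alt
  have hsplit : (PySem.Str.split? text "\n").getD []
      = List.map String.ofList (splitRec [] text.toList) := by
    simp [PySem.Str.split?, PySem.Chars.split?, splitOn_newline]
  have hsw : PySem.Str.startswith text "\n"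
      = (text.toList.head? == some '\n') := by
    rw [PySem.Str.startswith_eq]
    cases hts : text.toList with
    | nil => rfl
    | cons c rest =>
      by_cases h : c = '\n'
      · simp [PySem.Chars.startswith, List.isPrefixOf, h]
      · have h' : ¬('\n' = c) := fun hx => h hx.symm
        simp [PySem.Chars.startswith, List.isPrefixOf, h, h']
  rw [hsplit, hsw]
  by_cases hh : text.toList.head? = some '\n'
  · rw [if_pos (by simp [hh]), if_pos hh]
    cases hts : text.toList with
    | nil => simp [hts] at hh
    | cons c rest =>
      have hc : c = '\n' := by simp [hts] at hh; exact hh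
      rw [slice_one_neg_one]
      simp [splitRec, hc, piecesA_eq_dropLast]
  · rw [if_neg (by simp [hh]), if_neg hh, PySem.List.slice_to_neg_one]
    exact (piecesA_eq_dropLast _ _).symm

-- ===== VERDICT (by name: the statement is the Claim_ definition above) =====
theorem line_split_spec : Claim_equal_line_split := by
  intro text _
  unfold Spec_line_split
  rw [line_split_eq_piecesA, alt_eq_piecesA]
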